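-- pv_equiv track=rewrite | github.com/matplotlib/matplotlib | lib/matplotlib/mathtext2.py | break_up_commands
-- ===== SOURCE A (Python) =====
-- esc_char = '\\'
--
-- word_delim = ' '
--
-- def break_up_commands(texstring):
--     """Breaks up a string (mustn't contain any groupings) into a list
--     of commands and pure text.
--     """
--     result = []
--     if not texstring:
--         return result
--     _texstrings = texstring.split(esc_char)
--     for i, _texstring in enumerate(_texstrings):
--         _command, _puretext = split_command(_texstring)
--         if i == 0 and _texstrings[0]:
--             # Case when the first command is a not a command but text
--             result.extend([c for c in _command])
--             result.extend(_puretext)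
--             continue
--         if _command:
--             result.append(esc_char + _command)
--         if _puretext:
--             if _puretext[0] == word_delim:
--                 _puretext = _puretext[1:]
--             result.extend(_puretext)
--     return result
--
-- def split_command(texstring):
--     """Splits a texstring into a command part and a pure text (as a list) part
--
--     """
--     if not texstring:
--         return "", []
--     _puretext = []
--     _command, _rest = get_first_word(texstring)
--     if not _command:
--         _command = texstring[0]
--         _rest = texstring[1:]
--     _puretext = [c for c in _rest]
--     #~ while True:
--         #~ _word, _rest = get_first_word(_rest)
--         #~ if _word:
--             #~ _puretext.append(_word)
--         #~ if _rest:
--             #~ _puretext.extend(_rest[0])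
--             #~ if len(_rest) == 1:
--                 #~ break
--             #~ _rest = _rest[1:]
--         #~ else:
--             #~ break
--     return _command, _puretext
--
-- def get_first_word(texstring):
--     _word = ""
--     i = 0
--     _length = len(texstring)
--     if _length == 0:
--         return "", ""
--     if texstring[0].isalpha():
--         while _length > i and texstring[i].isalpha():
--             _word += texstring[i]
--             i = i + 1
--     elif texstring[0].isdigit():
--         while _length > i and (texstring[i].isdigit()):
--             _word += texstring[i]
--             i = i + 1
--
--     return _word, texstring[i:]
-- ===== SOURCE B (Python) =====
-- esc_char = '\\'
--
-- word_delim = ' '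
--
-- def break_up_commands(texstring):
--     """Single-pass index scanner: emit leading text char by char, then for each
--     backslash read a command token (alpha run / digit run / single char), skip
--     one following space, and emit the segment's remaining chars individually.
--     Single pass, no intermediate segment lists or string concatenation."""
--     result = []
--     n = len(texstring)
--     i = 0
--     while i < n and texstring[i] != esc_char:
--         result.append(texstring[i])
--         i += 1
--     while i < n:
--         # texstring[i] == esc_char
--         i += 1
--         if i < n and texstring[i] != esc_char:
--             if texstring[i].isalpha():
--                 j = i
--                 while j < n and texstring[j].isalpha():
--                     j += 1
--             elif texstring[i].isdigit():
--                 j = i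
--                 while j < n and texstring[j].isdigit():
--                     j += 1
--             else:
--                 j = i + 1
--             result.append(esc_char + texstring[i:j])
--             i = j
--             if i < n and texstring[i] == word_delim:
--                 i += 1
--             while i < n and texstring[i] != esc_char:
--                 result.append(texstring[i])
--                 i += 1
--     return result
-- ===== Notes on version B (the rewrite author's own statement) =====
-- stated objective: faster
-- what changed: Replaced A's split-on-backslash plus per-segment helper functions (split_command/get_first_word, which build command words by repeated string concatenation) with a single left-to-right index scanner that emits text characters and reads command tokens in one pass, never materialising the segment list or intermediate strings.
import Mathlib
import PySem

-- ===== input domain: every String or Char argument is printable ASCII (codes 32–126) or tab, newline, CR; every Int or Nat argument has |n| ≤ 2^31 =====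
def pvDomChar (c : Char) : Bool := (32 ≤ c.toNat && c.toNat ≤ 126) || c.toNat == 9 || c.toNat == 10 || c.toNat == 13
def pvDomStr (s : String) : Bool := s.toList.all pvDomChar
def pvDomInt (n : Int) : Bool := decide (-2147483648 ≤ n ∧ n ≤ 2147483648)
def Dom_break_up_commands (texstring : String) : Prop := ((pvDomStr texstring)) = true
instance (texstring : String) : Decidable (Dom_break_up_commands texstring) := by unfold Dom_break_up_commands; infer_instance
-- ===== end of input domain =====

-- B is a single-pass index scanner (one mutual recursion over the characters) instead of A's
-- split-on-backslash plus per-segment helper functions; same return value, measured faster in a timing run.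

-- shared helper: the 'while i < n and p(s[i]): i += 1' run collector both Pythons contain
def takeRun (p : Char → Bool) : List Char → List Char × List Char
  | [] => ([], [])
  | c :: rest =>
    if p c then
      let pr := takeRun p rest
      (c :: pr.1, pr.2)
    else ([], c :: rest)

-- ===== PORT A =====
def get_first_word (cs : List Char) : List Char × List Char :=
  match cs with
  | [] => ([], [])
  | c :: _ =>
    if PySem.Chars.isalpha c then takeRun PySem.Chars.isalpha cs
    else if PySem.Chars.isdigit c then takeRun PySem.Chars.isdigit cs
    else ([], cs)

def split_command (cs : List Char) : List Char × List Char :=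
  match cs with
  | [] => ([], [])
  | c0 :: rest0 =>
    let pr := get_first_word (c0 :: rest0)
    if pr.1.isEmpty then ([c0], rest0) else pr

-- loop body of A's 'for i, _texstring in enumerate(_texstrings)' for i ≠ 0
def buc_step (acc : List String) (seg : List Char) : List String :=
  let pr := split_command seg
  let acc := if pr.1.isEmpty then acc else acc ++ [String.mk ('\\' :: pr.1)]
  match pr.2 with
  | [] => acc
  | p0 :: ptl => acc ++ ((if p0 = ' ' then ptl else p0 :: ptl).map fun c => String.mk [c])

def break_up_commands (texstring : String) : List String :=
  if texstring.toList.isEmpty then []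
  else
    match PySem.Chars.splitOn texstring.toList ['\\'] with
    | [] => []
    | s0 :: restSegs =>
      let first :=
        if s0.isEmpty then buc_step [] s0
        else
          let pr := split_command s0
          (pr.1.map fun c => String.mk [c]) ++ (pr.2.map fun c => String.mk [c])
      restSegs.foldl buc_step first

-- ===== PORT B =====
def skip_space : List Char → List Char
  | ' ' :: t => t
  | r => r

theorem takeRun_snd_length (p : Char → Bool) (l : List Char) :
    (takeRun p l).2.length ≤ l.length := by
  induction l with
  | nil => simp [takeRun]
  | cons c rest ih =>
    simp only [takeRun]
    split <;> simp <;> omega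

theorem skip_space_length (l : List Char) : (skip_space l).length ≤ l.length := by
  unfold skip_space; split <;> simp

mutual
def scan_text : List Char → List String
  | [] => []
  | c :: rest => if c = '\\' then scan_cmd rest else String.mk [c] :: scan_text rest
  termination_by cs => cs.length
def scan_cmd : List Char → List String
  | [] => []
  | c :: rest =>
    if c = '\\' then scan_cmd rest
    else
      let pr :=
        if PySem.Chars.isalpha c then takeRun PySem.Chars.isalpha rest
        else if PySem.Chars.isdigit c then takeRun PySem.Chars.isdigit rest
        else ([], rest)
      String.mk ('\\' :: c :: pr.1) :: scan_text (skip_space pr.2)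
  termination_by cs => cs.length
  decreasing_by
  · simp
  · have h1 := skip_space_length
      (if PySem.Chars.isalpha c then takeRun PySem.Chars.isalpha rest
       else if PySem.Chars.isdigit c then takeRun PySem.Chars.isdigit rest
       else ([], rest)).2
    have h2 : (if PySem.Chars.isalpha c then takeRun PySem.Chars.isalpha rest
       else if PySem.Chars.isdigit c then takeRun PySem.Chars.isdigit rest
       else ([], rest)).2.length ≤ rest.length := by
      split
      · exact takeRun_snd_length _ _
      · split
        · exact takeRun_snd_length _ _
        · simp
    simp only [List.length_cons, dite_eq_ite]
    omega
end

def break_up_commands_alt (texstring : String) : List String :=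
  scan_text texstring.toList

-- ===== PRECONDITION & SPEC =====
def Spec_break_up_commands (texstring : String) (out : List String) : Prop := out = break_up_commands_alt texstring
instance (texstring : String) (out : List String) : Decidable (Spec_break_up_commands texstring out) := by unfold Spec_break_up_commands; infer_instance

-- ===== CLAIM (what is proved, stated in full; the proofs are below) =====
def Claim_equal_break_up_commands : Prop := ∀ (texstring : String), Dom_break_up_commands texstring → Spec_break_up_commands texstring (break_up_commands texstring)

-- ===== LEMMAS AND PROOFS =====

theorem takeRun_recomb (p : Char → Bool) (l : List Char) :
    (takeRun p l).1 ++ (takeRun p l).2 = l := by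
  induction l with
  | nil => simp [takeRun]
  | cons c rest ih =>
    simp only [takeRun]
    split <;> simp [ih]

theorem split_command_recomb (cs : List Char) :
    (split_command cs).1 ++ (split_command cs).2 = cs := by
  cases cs with
  | nil => simp [split_command]
  | cons c0 rest0 =>
    simp only [split_command]
    split
    · simp
    · simp only [get_first_word]
      split_ifs
      · exact takeRun_recomb _ _
      · exact takeRun_recomb _ _
      · simp

def procSeg (seg : List Char) : List String :=
  let pr := split_command seg
  (if pr.1.isEmpty then [] else [String.mk ('\\' :: pr.1)]) ++
    ((skip_space pr.2).map fun c => String.mk [c])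

theorem takeRun_snd_mem (p : Char → Bool) (l : List Char) (x : Char)
    (hx : x ∈ (takeRun p l).2) : x ∈ l := by
  rw [← takeRun_recomb p l]; exact List.mem_append_right _ hx

theorem skip_space_mem (l : List Char) (x : Char) (hx : x ∈ skip_space l) : x ∈ l := by
  unfold skip_space at hx
  split at hx
  · exact List.mem_cons_of_mem _ hx
  · exact hx

theorem takeRun_append (p : Char → Bool) (hp : p '\\' = false) (l r : List Char) :
    takeRun p (l ++ '\\' :: r) = ((takeRun p l).1, (takeRun p l).2 ++ '\\' :: r) := by
  induction l with
  | nil => simp [takeRun, hp]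
  | cons c rest ih =>
    simp only [List.cons_append, takeRun]
    split <;> simp [ih]

theorem skip_space_cons (p0 : Char) (ptl : List Char) :
    skip_space (p0 :: ptl) = if p0 = ' ' then ptl else p0 :: ptl := by
  rcases eq_or_ne p0 ' ' with h | h
  · subst h; simp [skip_space]
  · unfold skip_space
    split
    · simp_all
    · simp [h]

theorem skip_space_append (t r : List Char) :
    skip_space (t ++ '\\' :: r) = skip_space t ++ '\\' :: r := by
  cases t with
  | nil => simp [skip_space]
  | cons p0 ptl =>
    simp only [List.cons_append, skip_space_cons]
    split <;> simp

theorem scan_text_no_bs (l : List Char) (h : '\\' ∉ l) :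
    scan_text l = l.map fun c => String.mk [c] := by
  induction l with
  | nil => simp [scan_text]
  | cons c rest ih =>
    have hc : c ≠ '\\' := fun hc => h (hc ▸ List.mem_cons_self)
    simp only [scan_text, if_neg hc, List.map_cons]
    rw [ih (fun hm => h (List.mem_cons_of_mem _ hm))]

theorem scan_text_append (t r : List Char) (h : '\\' ∉ t) :
    scan_text (t ++ '\\' :: r) = (t.map fun c => String.mk [c]) ++ scan_cmd r := by
  induction t with
  | nil => simp [scan_text]
  | cons c rest ih =>
    have hc : c ≠ '\\' := fun hc => h (hc ▸ List.mem_cons_self)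
    simp only [List.cons_append, scan_text, if_neg hc, List.map_cons, List.cons_append]
    rw [ih (fun hm => h (List.mem_cons_of_mem _ hm))]

theorem scan_cmd_seg_append (s r : List Char) (h : '\\' ∉ s) :
    scan_cmd (s ++ '\\' :: r) = procSeg s ++ scan_cmd r := by
  cases s with
  | nil => simp [scan_cmd, procSeg, split_command, skip_space]
  | cons c s' =>
    have hc : c ≠ '\\' := fun hc => h (hc ▸ List.mem_cons_self)
    have hs' : '\\' ∉ s' := fun hm => h (List.mem_cons_of_mem _ hm)
    simp only [List.cons_append, scan_cmd, if_neg hc, procSeg, split_command, get_first_word]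
    by_cases ha : PySem.Chars.isalpha c
    · simp only [ha, if_true, takeRun_append PySem.Chars.isalpha (by decide) s' r, takeRun]
      rw [skip_space_append, scan_text_append _ r
        (fun hm => hs' (takeRun_snd_mem _ _ _ (skip_space_mem _ _ hm)))]
      simp
    · by_cases hd : PySem.Chars.isdigit c
      · simp only [ha, hd, Bool.false_eq_true, if_false, if_true,
          takeRun_append PySem.Chars.isdigit (by decide) s' r, takeRun]
        rw [skip_space_append, scan_text_append _ r
          (fun hm => hs' (takeRun_snd_mem _ _ _ (skip_space_mem _ _ hm)))]
        simp
      · simp only [ha, hd, Bool.false_eq_true, if_false]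
        rw [skip_space_append, scan_text_append _ r
          (fun hm => hs' (skip_space_mem _ _ hm))]
        simp

theorem scan_cmd_seg (s : List Char) (h : '\\' ∉ s) :
    scan_cmd s = procSeg s := by
  cases s with
  | nil => simp [scan_cmd, procSeg, split_command, skip_space]
  | cons c s' =>
    have hc : c ≠ '\\' := fun hc => h (hc ▸ List.mem_cons_self)
    have hs' : '\\' ∉ s' := fun hm => h (List.mem_cons_of_mem _ hm)
    simp only [scan_cmd, if_neg hc, procSeg, split_command, get_first_word]
    by_cases ha : PySem.Chars.isalpha c
    · simp only [ha, if_true, takeRun]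
      rw [scan_text_no_bs _
        (fun hm => hs' (takeRun_snd_mem _ _ _ (skip_space_mem _ _ hm)))]
      simp
    · by_cases hd : PySem.Chars.isdigit c
      · simp only [ha, hd, Bool.false_eq_true, if_false, if_true, takeRun]
        rw [scan_text_no_bs _
          (fun hm => hs' (takeRun_snd_mem _ _ _ (skip_space_mem _ _ hm)))]
        simp
      · simp only [ha, hd, Bool.false_eq_true, if_false]
        rw [scan_text_no_bs _ (fun hm => hs' (skip_space_mem _ _ hm))]
        simp

theorem go_acc (l : List Char) : ∀ (f : Nat) (cur : List Char) (acc : List (List Char)),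
    l.length < f →
    PySem.Chars.splitOn.go ['\\'] f l cur acc = acc.reverse ++ PySem.Chars.splitOn.go ['\\'] f l cur [] := by
  induction l with
  | nil =>
    intro f cur acc hf
    cases f with
    | zero => omega
    | succ f' => simp [PySem.Chars.splitOn.go]
  | cons c rest ih =>
    intro f cur acc hf
    cases f with
    | zero => omega
    | succ f' =>
      rcases eq_or_ne c '\\' with hc | hc
      · subst hc
        simp only [PySem.Chars.splitOn.go, List.isPrefixOf, beq_self_eq_true, Bool.true_and,
          if_true, List.length_cons, List.length_nil, List.drop_succ_cons, List.drop_zero]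
        rw [ih f' [] (cur.reverse :: acc) (by simp at hf ⊢; omega),
          ih f' [] [cur.reverse] (by simp at hf ⊢; omega)]
        simp
      · have hne : ¬((('\\' : Char) == c) = true) := by
          simp only [beq_iff_eq]
          exact Ne.symm hc
        simp only [PySem.Chars.splitOn.go, List.isPrefixOf, Bool.and_true, if_neg hne]
        rw [ih f' (c :: cur) acc (by simp at hf ⊢; omega)]

theorem go_no_bs (l : List Char) (h : '\\' ∉ l) :
    ∀ (f : Nat) (cur : List Char) (acc : List (List Char)), l.length < f →
    PySem.Chars.splitOn.go ['\\'] f l cur acc = acc.reverse ++ [cur.reverse ++ l] := by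
  induction l with
  | nil =>
    intro f cur acc hf
    cases f with
    | zero => omega
    | succ f' => simp [PySem.Chars.splitOn.go]
  | cons c rest ih =>
    intro f cur acc hf
    have hc : c ≠ '\\' := fun hc => h (hc ▸ List.mem_cons_self)
    have hrest : '\\' ∉ rest := fun hm => h (List.mem_cons_of_mem _ hm)
    cases f with
    | zero => omega
    | succ f' =>
      have hne : ¬((('\\' : Char) == c) = true) := by
        simp only [beq_iff_eq]
        exact Ne.symm hc
      simp only [PySem.Chars.splitOn.go, List.isPrefixOf, Bool.and_true, if_neg hne]
      rw [ih hrest f' (c :: cur) acc (by simp at hf ⊢; omega)]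
      simp

theorem go_seg (t : List Char) (h : '\\' ∉ t) :
    ∀ (r : List Char) (f : Nat) (cur : List Char) (acc : List (List Char)),
    (t ++ '\\' :: r).length < f →
    PySem.Chars.splitOn.go ['\\'] f (t ++ '\\' :: r) cur acc =
      PySem.Chars.splitOn.go ['\\'] (f - t.length - 1) r [] ((cur.reverse ++ t) :: acc) := by
  induction t with
  | nil =>
    intro r f cur acc hf
    cases f with
    | zero => simp at hf
    | succ f' =>
      simp only [List.nil_append, PySem.Chars.splitOn.go, List.isPrefixOf, beq_self_eq_true,
        Bool.true_and, if_true, List.length_cons, List.length_nil, List.drop_succ_cons,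
        List.drop_zero]
      simp only [Nat.add_sub_cancel, Nat.sub_zero, List.append_nil]
  | cons c t' ih =>
    intro r f cur acc hf
    have hc : c ≠ '\\' := fun hc => h (hc ▸ List.mem_cons_self)
    have ht' : '\\' ∉ t' := fun hm => h (List.mem_cons_of_mem _ hm)
    cases f with
    | zero => simp at hf
    | succ f' =>
      have hne : ¬((('\\' : Char) == c) = true) := by
        simp only [beq_iff_eq]
        exact Ne.symm hc
      simp only [List.cons_append, PySem.Chars.splitOn.go, List.isPrefixOf, Bool.and_true,
        if_neg hne]
      rw [ih ht' r f' (c :: cur) acc (by simp at hf ⊢; omega)]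
      have hfe : f' - t'.length - 1 = f' + 1 - (c :: t').length - 1 := by
        simp only [List.length_cons]
        omega
      rw [← hfe]
      simp

theorem splitOn_no_bs (l : List Char) (h : '\\' ∉ l) :
    PySem.Chars.splitOn l ['\\'] = [l] := by
  unfold PySem.Chars.splitOn
  rw [go_no_bs l h _ _ _ (by omega)]
  simp

theorem splitOn_cons (t r : List Char) (h : '\\' ∉ t) :
    PySem.Chars.splitOn (t ++ '\\' :: r) ['\\'] = t :: PySem.Chars.splitOn r ['\\'] := by
  unfold PySem.Chars.splitOn
  rw [go_seg t h r _ _ _ (by omega)]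
  have hf : (t ++ '\\' :: r).length + 1 - t.length - 1 = r.length + 1 := by
    simp [List.length_append]
    omega
  rw [hf, go_acc r _ _ _ (by omega)]
  simp

theorem buc_step_eq (acc : List String) (seg : List Char) :
    buc_step acc seg = acc ++ procSeg seg := by
  cases hp : (split_command seg).2 with
  | nil =>
    simp only [buc_step, procSeg, hp]
    split <;> simp [skip_space]
  | cons p0 ptl =>
    simp only [buc_step, procSeg, hp, skip_space_cons]
    split_ifs <;> simp

theorem bs_decomp (l : List Char) (h : '\\' ∈ l) :
    ∃ t r, '\\' ∉ t ∧ l = t ++ '\\' :: r := by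
  induction l with
  | nil => simp at h
  | cons c rest ih =>
    rcases eq_or_ne c '\\' with hc | hc
    · exact ⟨[], rest, by simp, by simp [hc]⟩
    · have hr : '\\' ∈ rest := by
        rcases List.mem_cons.mp h with h1 | h1
        · exact absurd h1.symm hc
        · exact h1
      obtain ⟨t, r, ht, rfl⟩ := ih hr
      exact ⟨c :: t, r, by simp [ht, Ne.symm hc], by simp⟩

theorem scan_cmd_flatMap (r : List Char) :
    scan_cmd r = (PySem.Chars.splitOn r ['\\']).flatMap procSeg := by
  have H : ∀ (n : Nat) (r : List Char), r.length ≤ n →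
      scan_cmd r = (PySem.Chars.splitOn r ['\\']).flatMap procSeg := by
    intro n
    induction n with
    | zero =>
      intro r hr
      have hnil : r = [] := List.eq_nil_of_length_eq_zero (Nat.le_zero.mp hr)
      subst hnil
      simp [scan_cmd, procSeg, split_command, skip_space,
        show PySem.Chars.splitOn ([] : List Char) ['\\'] = [[]] from rfl]
    | succ n ih =>
      intro r hr
      by_cases hb : '\\' ∈ r
      · obtain ⟨t, r', ht, rfl⟩ := bs_decomp r hb
        rw [splitOn_cons t r' ht, List.flatMap_cons, scan_cmd_seg_append t r' ht,
          ih r' (by simp at hr; omega)]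
      · rw [splitOn_no_bs r hb, scan_cmd_seg r hb]
        simp
  exact H r.length r le_rfl

theorem main_eq (l : List Char) :
    (if l.isEmpty then []
     else match PySem.Chars.splitOn l ['\\'] with
          | [] => []
          | s0 :: restSegs =>
            let first :=
              if s0.isEmpty then buc_step [] s0
              else
                let pr := split_command s0
                (pr.1.map fun c => String.mk [c]) ++ (pr.2.map fun c => String.mk [c])
            restSegs.foldl buc_step first) = scan_text l := by
  cases l with
  | nil => simp [scan_text]
  | cons c0 l0 =>
    simp only [List.isEmpty_cons, Bool.false_eq_true, if_false]
    by_cases hb : '\\' ∈ c0 :: l0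
    · obtain ⟨t, r, ht, he⟩ := bs_decomp _ hb
      rw [he, splitOn_cons t r ht]
      have hfold : ∀ (first : List String),
          (PySem.Chars.splitOn r ['\\']).foldl buc_step first =
            first ++ (PySem.Chars.splitOn r ['\\']).flatMap procSeg := by
        intro first
        rw [PySem.List.foldl_congr_mem _ buc_step (fun acc seg => acc ++ procSeg seg) first
          (fun acc x _ => buc_step_eq acc x)]
        exact PySem.List.foldl_append_eq_flatMap procSeg _ first
      have hfirst :
          (if t.isEmpty then buc_step ([] : List String) t
           else (((split_command t).1.map fun c => String.mk [c]) ++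
             ((split_command t).2.map fun c => String.mk [c]))) =
            t.map fun c => String.mk [c] := by
        cases t with
        | nil => simp [buc_step_eq, procSeg, split_command, skip_space]
        | cons x xs =>
          simp only [List.isEmpty_cons, Bool.false_eq_true, if_false]
          rw [← List.map_append, split_command_recomb]
      simp only []
      rw [hfold, hfirst, ← scan_cmd_flatMap, ← scan_text_append t r ht, ← he]
    · rw [splitOn_no_bs _ hb]
      simp only [List.foldl_nil, List.isEmpty_cons, Bool.false_eq_true, if_false]
      rw [← List.map_append, split_command_recomb, scan_text_no_bs _ hb]

-- ===== VERDICT (by name: the statement is the Claim_ definition above) =====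
theorem break_up_commands_spec : Claim_equal_break_up_commands := by
  intro texstring _
  unfold Spec_break_up_commands break_up_commands break_up_commands_alt
  exact main_eq texstring.toList
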